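-- pv_equiv track=rewrite | github.com/dantekali/IOLAB | iolab-files/ioLab.py | worstQlty
-- ===== SOURCE A (Python) =====
-- def worstQlty(seqLine, qltyLine):
--     worstqlty = qltyLine[0] - 33
--     base      = seqLine[0]
--     seqlength = len( seqLine )
--
--     for i in range(seqlength):
--         quality =  qltyLine[i] - 33
--         if ( quality < worstqlty ):
--             worstqlty = quality
--             base = seqLine[i]
--     return [base,worstqlty]
-- ===== SOURCE B (Python) =====
-- def worstQlty(seqLine, qltyLine):
--     quals = [qltyLine[i] - 33 for i in range(len(seqLine))]
--     worst = min(quals)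
--     return [seqLine[quals.index(worst)], worst]
-- ===== Notes on version B (the rewrite author's own statement) =====
-- stated objective: simpler
-- what changed: Replaces A's fused single scan carrying a (base, worst) pair with a two-pass decomposition: build the quality list, take min(), then index() the first occurrence.
import Mathlib
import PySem

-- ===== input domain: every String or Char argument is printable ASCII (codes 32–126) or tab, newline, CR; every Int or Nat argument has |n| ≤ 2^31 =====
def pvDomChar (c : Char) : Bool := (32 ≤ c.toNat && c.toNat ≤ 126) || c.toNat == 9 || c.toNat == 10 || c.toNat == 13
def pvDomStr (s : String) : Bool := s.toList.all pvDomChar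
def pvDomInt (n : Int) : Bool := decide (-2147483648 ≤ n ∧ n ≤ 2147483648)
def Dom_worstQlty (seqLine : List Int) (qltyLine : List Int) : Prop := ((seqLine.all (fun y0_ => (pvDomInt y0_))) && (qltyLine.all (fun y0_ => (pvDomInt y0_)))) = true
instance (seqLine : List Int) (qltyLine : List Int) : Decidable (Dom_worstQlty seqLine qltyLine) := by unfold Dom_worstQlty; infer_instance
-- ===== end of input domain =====

-- ===== PORT A =====
-- B is a two-pass decomposition (build quality list, min, first index) of A's fused scan; equal return values wherever A returns.
def worstQlty (seqLine : List Int) (qltyLine : List Int) : List Int :=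
  let worstqlty0 := PySem.List.pyGetD qltyLine 0 0 - 33
  let base0 := PySem.List.pyGetD seqLine 0 0
  let st := (PySem.List.pyRange 0 (seqLine.length : Int) 1).foldl
    (fun (st : Int × Int) i =>
      let quality := PySem.List.pyGetD qltyLine i 0 - 33
      if quality < st.2 then (PySem.List.pyGetD seqLine i 0, quality) else st)
    (base0, worstqlty0)
  [st.1, st.2]

-- ===== PORT B =====
def worstQlty_alt (seqLine : List Int) (qltyLine : List Int) : List Int :=
  let quals := (PySem.List.pyRange 0 (seqLine.length : Int) 1).map
    (fun i => PySem.List.pyGetD qltyLine i 0 - 33)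
  let worst := (PySem.List.min? quals (fun x => x)).getD 0
  let j := (PySem.List.index? quals worst).getD 0
  [PySem.List.pyGetD seqLine (j : Int) 0, worst]

-- ===== PRECONDITION & SPEC =====
-- Pre_ excludes exactly the inputs where A raises IndexError: empty seqLine (or empty qltyLine),
-- or qltyLine shorter than seqLine.
def Pre_worstQlty (seqLine : List Int) (qltyLine : List Int) : Prop :=
  seqLine ≠ [] ∧ seqLine.length ≤ qltyLine.length
instance (seqLine : List Int) (qltyLine : List Int) : Decidable (Pre_worstQlty seqLine qltyLine) := by
  unfold Pre_worstQlty; infer_instance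
def pvWitness_worstQlty : List Int × List Int := ([65, 67, 71], [40, 38, 39])
def Spec_worstQlty (seqLine : List Int) (qltyLine : List Int) (out : List Int) : Prop := out = worstQlty_alt seqLine qltyLine
instance (seqLine : List Int) (qltyLine : List Int) (out : List Int) : Decidable (Spec_worstQlty seqLine qltyLine out) := by unfold Spec_worstQlty; infer_instance

-- ===== CLAIM (what is proved, stated in full; the proofs are below) =====
def Claim_equal_worstQlty : Prop := ∀ (seqLine : List Int) (qltyLine : List Int), Dom_worstQlty seqLine qltyLine → Pre_worstQlty seqLine qltyLine → Spec_worstQlty seqLine qltyLine (worstQlty seqLine qltyLine)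

-- ===== LEMMAS AND PROOFS =====

-- Characterisation of A's fused scan over indices 0..n-1: its second component is the minimum of
-- the quality list, and its first component is the sequence value at the FIRST index attaining it.
lemma foldA_spec (s q : Nat → Int) (n : Nat) (hn : 1 ≤ n) :
    (((List.range n).foldl (fun (st : Int × Int) k => if q k < st.2 then (s k, q k) else st) (s 0, q 0)).2
        ∈ (List.range n).map q)
    ∧ (∀ x ∈ (List.range n).map q,
        (((List.range n).foldl (fun (st : Int × Int) k => if q k < st.2 then (s k, q k) else st) (s 0, q 0)).2 ≤ x))
    ∧ ∃ jn, PySem.List.index? ((List.range n).map q)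
          (((List.range n).foldl (fun (st : Int × Int) k => if q k < st.2 then (s k, q k) else st) (s 0, q 0)).2)
          = some jn
        ∧ (((List.range n).foldl (fun (st : Int × Int) k => if q k < st.2 then (s k, q k) else st) (s 0, q 0)).1 = s jn) := by
  induction n with
  | zero => omega
  | succ m ih =>
    rcases Nat.eq_or_lt_of_le hn with h1 | h1
    · -- m + 1 = 1: one iteration, which compares q 0 < q 0 and keeps the initial state
      have hm : m = 0 := by omega
      subst hm
      refine ⟨by simp, by simp, 0, ?_, by simp⟩
      simp
    · have hm : 1 ≤ m := by omega
      obtain ⟨hmem, hmin, jn, hidx, hfst⟩ := ih hm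
      rw [List.range_succ, List.foldl_append, List.map_append]
      set r := ((List.range m).foldl (fun (st : Int × Int) k => if q k < st.2 then (s k, q k) else st) (s 0, q 0)) with hr
      simp only [List.foldl_cons, List.foldl_nil]
      by_cases hc : q m < r.2
      · rw [if_pos hc]
        have hnotmem : q m ∉ (List.range m).map q := by
          intro hx
          exact absurd (hmin _ hx) (by omega)
        refine ⟨by simp, ?_, ((List.range m).map q).length, ?_, by simp⟩
        · intro x hx
          rcases List.mem_append.1 hx with hx | hx
          · have := hmin x hx; omega
          · simp at hx; omega
        · exact PySem.List.index?_append_singleton_self _ _ hnotmem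
      · rw [if_neg hc]
        refine ⟨List.mem_append.2 (Or.inl hmem), ?_, jn, ?_, hfst⟩
        · intro x hx
          rcases List.mem_append.1 hx with hx | hx
          · exact hmin x hx
          · simp at hx; omega
        · rw [PySem.List.index?_append_of_mem _ hmem, hidx]

-- A's scan result equals B's two-pass (min, then first index) result, abstractly over the
-- per-index sequence value s and quality value q.
lemma two_pass_eq (s q : Nat → Int) (n : Nat) (hn : 1 ≤ n) :
    [((List.range n).foldl (fun (st : Int × Int) k => if q k < st.2 then (s k, q k) else st) (s 0, q 0)).1,
     ((List.range n).foldl (fun (st : Int × Int) k => if q k < st.2 then (s k, q k) else st) (s 0, q 0)).2]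
    = [s ((PySem.List.index? ((List.range n).map q)
            ((PySem.List.min? ((List.range n).map q) (fun x => x)).getD 0)).getD 0),
       (PySem.List.min? ((List.range n).map q) (fun x => x)).getD 0] := by
  obtain ⟨hmem, hmin, jn, hidx, hfst⟩ := foldA_spec s q n hn
  set r := ((List.range n).foldl (fun (st : Int × Int) k => if q k < st.2 then (s k, q k) else st) (s 0, q 0)) with hr
  set quals := (List.range n).map q with hquals
  have hne' : quals ≠ [] := by
    simp only [hquals, ne_eq, List.map_eq_nil_iff, List.range_eq_nil]
    omega
  obtain ⟨m, hm⟩ : ∃ m, PySem.List.min? quals (fun x => x) = some m := by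
    cases h : PySem.List.min? quals (fun x => x) with
    | none => exact absurd ((PySem.List.min?_eq_none_iff quals _).mp h) hne'
    | some m => exact ⟨m, rfl⟩
  have hmr : m = r.2 := le_antisymm (PySem.List.min?_isMin hm _ hmem) (hmin _ (PySem.List.min?_mem hm))
  rw [hm]
  simp only [Option.getD_some, hmr, hidx, hfst]

-- ===== VERDICT (by name: the statement is the Claim_ definition above) =====
theorem worstQlty_spec : Claim_equal_worstQlty := by
  unfold Claim_equal_worstQlty
  intro seqLine qltyLine _ hpre
  obtain ⟨hne, hlen⟩ := hpre
  have hn : 1 ≤ seqLine.length := List.length_pos_iff.mpr hne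
  unfold Spec_worstQlty worstQlty worstQlty_alt
  simpa only [PySem.List.pyRange_zero_nat, List.foldl_map, List.map_map, Function.comp_def,
    Nat.cast_zero] using
    two_pass_eq (fun k => PySem.List.pyGetD seqLine (k : Int) 0)
      (fun k => PySem.List.pyGetD qltyLine (k : Int) 0 - 33) seqLine.length hn
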